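-- pv_equiv track=rewrite | github.com/brxxlstxrs/mpython | test3/lastwarning.py | ends
-- ===== SOURCE A (Python) =====
-- def ends(value: int, lst: tuple[str]) -> str | None:
--     res = []
--     function = lambda x: x[-1].isalpha()
--     if value != 0:
--         function = lambda x: not(x[-1].isalpha())
--
--     for s in lst:
--         res.append(s) if function(s) else 0
--     return max(res) if res else None
-- ===== SOURCE B (Python) =====
-- def ends(value, lst):
--     keep = (lambda s: not s[-1].isalpha()) if value != 0 else (lambda s: s[-1].isalpha())
--     best = None
--     for s in lst:
--         if keep(s):
--             if best is None or s > best: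
--                 best = s
--     return best
-- ===== Notes on version B (the rewrite author's own statement) =====
-- stated objective: alternative
-- what changed: B fuses filtering and maximization into one pass with a running best (no intermediate list, no max() call) instead of A's build-a-filtered-list-then-max.
import Mathlib
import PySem

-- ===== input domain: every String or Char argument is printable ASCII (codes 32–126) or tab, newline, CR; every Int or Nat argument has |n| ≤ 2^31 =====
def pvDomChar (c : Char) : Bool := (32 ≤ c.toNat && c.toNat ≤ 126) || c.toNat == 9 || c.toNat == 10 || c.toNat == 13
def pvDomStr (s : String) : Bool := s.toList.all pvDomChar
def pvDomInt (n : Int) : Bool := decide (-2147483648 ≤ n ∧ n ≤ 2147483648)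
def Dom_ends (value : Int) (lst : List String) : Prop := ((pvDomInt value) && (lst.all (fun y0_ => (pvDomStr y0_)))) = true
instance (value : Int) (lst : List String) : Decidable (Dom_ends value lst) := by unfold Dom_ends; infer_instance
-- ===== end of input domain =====

-- B fuses filter+max into one pass with a running best (no intermediate list); same O(n) cost, different traversal.


-- ===== PORT A =====
-- x[-1].isalpha(); on x = "" Python raises IndexError (excluded by Pre_ends), the `none` branch is unreachable there
def endsLastAlpha (x : String) : Bool :=
  match PySem.Str.pyGet? x (-1) with
  | some c => PySem.Chars.isalpha c
  | none => false

def ends (value : Int) (lst : List String) : Option String :=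
  let function : String → Bool :=
    if value ≠ 0 then (fun x => !(endsLastAlpha x)) else endsLastAlpha
  let res := lst.foldl (fun res s => if function s then res ++ [s] else res) ([] : List String)
  if res ≠ [] then PySem.List.max? res (fun y => y) else none

-- ===== PORT B =====
-- s[-1].isalpha() for B's predicate; same IndexError on "" (excluded by Pre_ends)
def altLastAlpha (s : String) : Bool :=
  match PySem.Str.pyGet? s (-1) with
  | some c => PySem.Chars.isalpha c
  | none => false

def ends_alt (value : Int) (lst : List String) : Option String :=
  let keep : String → Bool :=
    if value ≠ 0 then (fun s => !(altLastAlpha s)) else altLastAlpha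
  lst.foldl (fun best s =>
    if keep s then
      match best with
      | none => some s
      | some b => if b < s then some s else best
    else best) none

-- ===== PRECONDITION & SPEC =====
-- Pre_ excludes exactly the inputs where A raises: a list containing the empty string makes s[-1] an IndexError.
def Pre_ends (value : Int) (lst : List String) : Prop := "" ∉ lst
instance (value : Int) (lst : List String) : Decidable (Pre_ends value lst) := by unfold Pre_ends; infer_instance
def pvWitness_ends : Int × List String := (1, ["ab", "c1"])

def Spec_ends (value : Int) (lst : List String) (out : Option String) : Prop := out = ends_alt value lst
instance (value : Int) (lst : List String) (out : Option String) : Decidable (Spec_ends value lst out) := by unfold Spec_ends; infer_instance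

-- ===== CLAIM (what is proved, stated in full; the proofs are below) =====
def Claim_equal_ends : Prop := ∀ (value : Int) (lst : List String), Dom_ends value lst → Pre_ends value lst → Spec_ends value lst (ends value lst)

-- ===== LEMMAS AND PROOFS =====

-- B's running-max loop over a nonempty seed is the foldl-max of the list
lemma ends_runmax_some (t : List String) : ∀ (x : String),
    t.foldl (fun best s =>
      match best with
      | none => some s
      | some b => if b < s then some s else best) (some x)
    = some (t.foldl max x) := by
  induction t with
  | nil => intro x; rfl
  | cons y t ih =>
    intro x
    simp only [List.foldl_cons]
    have h : (if x < y then some y else some x) = some (max x y) := by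
      rcases lt_or_ge x y with h | h
      · simp [h, max_eq_right h.le]
      · simp [not_lt.mpr h, max_eq_left h]
    rw [h, ih]

-- the general fuse lemma: filter-then-max equals the one-pass running max, for any predicate
lemma ends_fuse (p : String → Bool) (lst : List String) :
    (if lst.filter p ≠ [] then PySem.List.max? (lst.filter p) (fun y => y) else none)
    = lst.foldl (fun best s =>
        if p s then
          match best with
          | none => some s
          | some b => if b < s then some s else best
        else best) none := by
  rw [← List.foldl_filter]
  cases h : lst.filter p with
  | nil => simp
  | cons x t =>
    simp only [ne_eq, reduceCtorEq, not_false_iff, if_true, PySem.List.max?_id_cons,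
      List.foldl_cons]
    exact (ends_runmax_some t x).symm

-- ===== VERDICT (by name: the statement is the Claim_ definition above) =====
theorem ends_spec : Claim_equal_ends := by
  intro value lst _hdom _hpre
  unfold Spec_ends ends ends_alt
  simp only [PySem.List.foldl_append_if, List.nil_append, List.map_id']
  by_cases hv : value ≠ 0
  · simp only [if_pos hv]
    exact ends_fuse (fun x => !(endsLastAlpha x)) lst
  · simp only [if_neg hv]
    exact ends_fuse endsLastAlpha lst
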